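-- pv_equiv track=rewrite | github.com/Viknesh-Rajaramon/Leetcode-Problems | Algorithms/Hard/3911_K-th_Smallest_Remaining_Even_Integer_in_Subarray_Queries/Python3.py | kthRemainingInteger
-- ===== SOURCE A (Python) =====
-- from bisect import bisect_left, bisect_right
--
-- def kthRemainingInteger(nums: list[int], queries: list[list[int]]) -> list[int]:
--     arr = [i for i in range(len(nums)) if nums[i] % 2 == 0]
--     prefix = [(nums[arr[0]]-2) // 2] if arr else []
--     for i in range(len(arr)-1):
--         prefix.append((nums[arr[i+1]] - nums[arr[i]] - 2) // 2)
--
--     for i in range(1, len(prefix)):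
--         prefix[i] += prefix[i-1]
--
--     result = []
--     for l, r, k in queries:
--         left, right = bisect_left(arr, l), bisect_right(arr, r)-1
--         if left >= len(arr) or right < 0:
--             result.append(2*k)
--             continue
--
--         first, last = nums[arr[left]] // 2, nums[arr[right]] // 2
--         if k < first:
--             result.append(2*k)
--         elif last-right+left <= k:
--             k += right - left + 1
--             result.append(2*k)
--         else:
--             k -= left
--             idx = bisect_left(prefix, k) - 1
--             result.append(nums[arr[idx]] + 2*(k - prefix[idx]))
--
--     return result
-- ===== SOURCE B (Python) =====
-- def kthRemainingInteger(nums: list[int], queries: list[list[int]]) -> list[int]: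
--     result = []
--     for l, r, k in queries:
--         cand = 2 * k
--         for i, v in enumerate(nums):
--             if l <= i <= r and v % 2 == 0:
--                 if v <= cand:
--                     cand += 2
--                 else:
--                     break
--         result.append(cand)
--     return result
-- ===== Notes on version B (the rewrite author's own statement) =====
-- stated objective: simpler
-- what changed: B drops A's global even-index/prefix-gap precomputation and bisect lookups entirely: per query it scans nums once and does an order-statistic walk (cand = 2*k; bump cand by 2 for each in-range even value <= cand, stopping at the first larger one).
-- outside the precondition, e.g. on kthRemainingInteger([12, -1, 2], [[1, 1, 1]]): A returns [4], B returns [2]; on kthRemainingInteger([2, 4, 6], [[2, 0, 3]]): A returns [4], B returns [6]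
import Mathlib
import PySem

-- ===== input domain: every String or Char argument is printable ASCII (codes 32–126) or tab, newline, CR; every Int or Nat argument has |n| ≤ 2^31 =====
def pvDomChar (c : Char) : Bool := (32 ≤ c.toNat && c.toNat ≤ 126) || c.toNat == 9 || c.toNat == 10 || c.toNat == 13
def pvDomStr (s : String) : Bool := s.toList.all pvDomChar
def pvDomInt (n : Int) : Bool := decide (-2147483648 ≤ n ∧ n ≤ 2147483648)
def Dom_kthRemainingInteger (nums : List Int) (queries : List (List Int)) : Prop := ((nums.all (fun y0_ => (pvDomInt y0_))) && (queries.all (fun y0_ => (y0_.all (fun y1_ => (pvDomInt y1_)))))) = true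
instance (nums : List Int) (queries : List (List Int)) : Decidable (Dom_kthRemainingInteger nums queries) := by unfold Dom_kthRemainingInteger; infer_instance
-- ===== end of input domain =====

-- B replaces A's even-index/prefix precomputation + bisect lookups by a plain per-query
-- order-statistic scan: simpler, no precomputation (objective: simpler, not faster).

-- ===== PORT A =====
-- arr = [i for i in range(len(nums)) if nums[i] % 2 == 0]
def pvArr (nums : List Int) : List Int :=
  (PySem.List.pyRange 0 (PySem.List.len nums) 1).filter
    (fun i => PySem.Int.mod (PySem.List.pyGetD nums i 0) 2 == 0)

-- the in-place loop 'for i in range(1, len(prefix)): prefix[i] += prefix[i-1]' turns prefix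
-- into its list of running sums; pvCumsum acc computes exactly those running sums
def pvCumsum (acc : Int) : List Int → List Int
  | [] => []
  | x :: t => (acc + x) :: pvCumsum (acc + x) t

-- prefix = [(nums[arr[0]]-2)//2] if arr else []
def pvPrefixBase (nums arr : List Int) : List Int :=
  if arr ≠ [] then
    [PySem.Int.floordiv (PySem.List.pyGetD nums (PySem.List.pyGetD arr 0 0) 0 - 2) 2]
  else []

-- 'for i in range(len(arr)-1): prefix.append((nums[arr[i+1]] - nums[arr[i]] - 2)//2)'
def pvPrefixDiffs (nums arr : List Int) : List Int :=
  (PySem.List.pyRange 0 (PySem.List.len arr - 1) 1).foldl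
    (fun p i => p ++ [PySem.Int.floordiv
        (PySem.List.pyGetD nums (PySem.List.pyGetD arr (i + 1) 0) 0
          - PySem.List.pyGetD nums (PySem.List.pyGetD arr i 0) 0 - 2) 2]) (pvPrefixBase nums arr)

def pvPrefix (nums : List Int) : List Int := pvCumsum 0 (pvPrefixDiffs nums (pvArr nums))

-- the body of A's query loop: the value(s) appended to result for one query
def pvAdelta (nums arr prefixL : List Int) (q : List Int) : List Int :=
  match q with
  | [l, r, k] =>
    let left : Nat := PySem.List.bisectLeft arr l
    let right : Int := (PySem.List.bisectRight arr r : Int) - 1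
    if left ≥ arr.length ∨ right < 0 then [2 * k]
    else
      let first := PySem.Int.floordiv (PySem.List.pyGetD nums (PySem.List.pyGetD arr (left : Int) 0) 0) 2
      let last := PySem.Int.floordiv (PySem.List.pyGetD nums (PySem.List.pyGetD arr right 0) 0) 2
      if k < first then [2 * k]
      else if last - right + (left : Int) ≤ k then
        [2 * (k + right - (left : Int) + 1)]        -- k += right - left + 1; append 2*k
      else
        let k3 := k - (left : Int)
        let idx : Int := (PySem.List.bisectLeft prefixL k3 : Int) - 1
        [PySem.List.pyGetD nums (PySem.List.pyGetD arr idx 0) 0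
          + 2 * (k3 - PySem.List.pyGetD prefixL idx 0)]
  | _ => []   -- Python raises ValueError (unpacking) on a query not of shape [l, r, k]; Pre_ excludes these

def kthRemainingInteger (nums : List Int) (queries : List (List Int)) : List Int :=
  let arr := pvArr nums
  let prefixL := pvPrefix nums
  queries.foldl (fun result q => result ++ pvAdelta nums arr prefixL q) []

-- ===== PORT B =====
-- the inner 'for i, v in enumerate(nums)' loop of Source B, with its break
def pvWalkB (l r : Int) : List (Int × Int) → Int → Int
  | [], cand => cand
  | (i, v) :: rest, cand =>
    if l ≤ i ∧ i ≤ r ∧ PySem.Int.mod v 2 = 0 then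
      if v ≤ cand then pvWalkB l r rest (cand + 2) else cand
    else pvWalkB l r rest cand

def pvBdelta (nums : List Int) (q : List Int) : List Int :=
  match q with
  | [l, r, k] => [pvWalkB l r (PySem.List.enumerate nums) (2 * k)]
  | _ => []   -- Python raises ValueError here; Pre_ excludes these

def kthRemainingInteger_alt (nums : List Int) (queries : List (List Int)) : List Int :=
  queries.foldl (fun result q => result ++ pvBdelta nums q) []

-- ===== PRECONDITION & SPEC =====
-- Pre_ excludes (a) queries not of shape [l, r, k] — Python A raises ValueError unpacking them —
-- and (b) inputs violating the LeetCode problem's guarantees (the even elements of nums strictly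
-- increasing in index order, and l ≤ r in every query — except that a reversed window lying
-- entirely outside the index range is harmless and admitted), on which A's prefix/bisect
-- arithmetic returns accidental values that no specification would prescribe.
def Pre_kthRemainingInteger (nums : List Int) (queries : List (List Int)) : Prop :=
  List.Pairwise (· < ·) (nums.filter (fun v => PySem.Int.mod v 2 == 0)) ∧
  ∀ q ∈ queries, q.length = 3 ∧
    (q.getD 0 0 ≤ q.getD 1 0 ∨ q.getD 1 0 < 0 ∨ (nums.length : Int) ≤ q.getD 0 0)

instance (nums : List Int) (queries : List (List Int)) : Decidable (Pre_kthRemainingInteger nums queries) := by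
  unfold Pre_kthRemainingInteger; infer_instance

def pvWitness_kthRemainingInteger : List Int × List (List Int) := ([1, 2, 4, 7], [[0, 3, 1], [1, 2, 0]])

def Spec_kthRemainingInteger (nums : List Int) (queries : List (List Int)) (out : List Int) : Prop := out = kthRemainingInteger_alt nums queries
instance (nums : List Int) (queries : List (List Int)) (out : List Int) : Decidable (Spec_kthRemainingInteger nums queries out) := by unfold Spec_kthRemainingInteger; infer_instance

-- ===== CLAIM (what is proved, stated in full; the proofs are below) =====
def Claim_equal_kthRemainingInteger : Prop := ∀ (nums : List Int) (queries : List (List Int)), Dom_kthRemainingInteger nums queries → Pre_kthRemainingInteger nums queries → Spec_kthRemainingInteger nums queries (kthRemainingInteger nums queries)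

-- ===== LEMMAS AND PROOFS =====

-- the even values of nums, in index order (A reads them as nums[arr[i]])
def pvE (nums : List Int) : List Int := (pvArr nums).map (fun j => PySem.List.pyGetD nums j 0)

-- half of the i-th even value
def pvH (nums : List Int) (i : Nat) : Int := PySem.Int.floordiv ((pvE nums).getD i 0) 2

-- B's walk on the values alone
def pvWalkV : List Int → Int → Int
  | [], cand => cand
  | v :: t, cand => if v ≤ cand then pvWalkV t (cand + 2) else cand

theorem pvRFM (nums : List Int) (p : Int → Bool) :
    ((List.range nums.length).filter (fun j => p (nums.getD j 0))).map (fun j => nums.getD j 0)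
      = nums.filter p := by
  induction nums with
  | nil => simp
  | cons a t ih =>
    rw [List.length_cons, List.range_succ_eq_map, List.filter_cons]
    simp only [List.getD_cons_zero]
    by_cases hp : p a
    · rw [if_pos hp, List.map_cons, List.filter_map, List.map_map]
      simp only [Function.comp_def, List.getD_cons_succ]
      rw [ih, List.filter_cons, if_pos hp]
      simp
    · rw [if_neg hp, List.filter_map, List.map_map]
      simp only [Function.comp_def, List.getD_cons_succ]
      rw [ih, List.filter_cons, if_neg hp]

theorem pvE_eq_filter (nums : List Int) :
    pvE nums = nums.filter (fun v => PySem.Int.mod v 2 == 0) := by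
  unfold pvE pvArr
  rw [PySem.List.len_eq, PySem.List.pyRange_zero_natCast]
  rw [List.filter_map, List.map_map]
  simp only [Function.comp_def, PySem.List.pyGetD_natCast]
  exact pvRFM nums (fun v => PySem.Int.mod v 2 == 0)

theorem pvArr_pairwise (nums : List Int) : (pvArr nums).Pairwise (· < ·) := by
  unfold pvArr
  rw [PySem.List.len_eq, PySem.List.pyRange_zero_natCast]
  exact ((List.pairwise_lt_range).map _ (fun a b h => by exact_mod_cast h)).filter _

theorem pvE_length (nums : List Int) : (pvE nums).length = (pvArr nums).length := by
  simp [pvE]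

theorem pvLookup (nums : List Int) (i : Nat) (h : i < (pvArr nums).length) :
    PySem.List.pyGetD nums (PySem.List.pyGetD (pvArr nums) ((i : Nat) : Int) 0) 0
      = (pvE nums)[i]'(by rw [pvE_length]; exact h) := by
  rw [PySem.List.pyGetD_natCast, List.getD_eq_getElem _ _ h]
  unfold pvE
  rw [List.getElem_map]

theorem pvE_even (nums : List Int) (i : Nat) (h : i < (pvE nums).length) :
    (pvE nums)[i] = 2 * pvH nums i := by
  have hmem : (pvE nums)[i] ∈ nums.filter (fun v => PySem.Int.mod v 2 == 0) := by
    rw [← pvE_eq_filter]; exact List.getElem_mem h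
  have heven : PySem.Int.mod ((pvE nums)[i]) 2 = 0 := by
    have := List.of_mem_filter hmem; simpa using this
  obtain ⟨c, hc⟩ := (PySem.Int.mod_eq_zero_iff_dvd _ _).mp heven
  unfold pvH
  rw [List.getD_eq_getElem _ _ h, hc, PySem.Int.floordiv_eq_ediv_of_pos (by norm_num),
    Int.mul_ediv_cancel_left c (by norm_num)]

theorem pvH_mono (nums : List Int)
    (hch : List.Pairwise (· < ·) (nums.filter (fun v => PySem.Int.mod v 2 == 0)))
    (i d : Nat) (h : i + d < (pvE nums).length) :
    pvH nums i + (d : Int) ≤ pvH nums (i + d) := by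
  rw [← pvE_eq_filter] at hch
  induction d with
  | zero => simp
  | succ d' ih =>
    have h' : i + d' < (pvE nums).length := by omega
    have hp : (pvE nums)[i + d'] < (pvE nums)[i + d' + 1]'(by omega) :=
      List.pairwise_iff_getElem.mp hch (i + d') (i + d' + 1) h' (by omega) (by omega)
    have e1 := pvE_even nums (i + d') h'
    have e2 := pvE_even nums (i + d' + 1) (by omega)
    have step : pvH nums (i + d') < pvH nums (i + d' + 1) := by omega
    have := ih h'
    have hidx : i + (d' + 1) = i + d' + 1 := by omega
    rw [hidx]
    push_cast
    omega

theorem pvWalkB_filter (l r : Int) (ps : List (Int × Int)) (c : Int) :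
    pvWalkB l r ps c
      = pvWalkV ((ps.filter (fun p => decide (l ≤ p.1 ∧ p.1 ≤ r ∧ PySem.Int.mod p.2 2 = 0))).map Prod.snd) c := by
  induction ps generalizing c with
  | nil => rfl
  | cons p t ih =>
    obtain ⟨i, v⟩ := p
    rw [List.filter_cons]
    by_cases h : l ≤ i ∧ i ≤ r ∧ PySem.Int.mod v 2 = 0
    · rw [if_pos (by simpa using h), List.map_cons]
      simp only [pvWalkB, pvWalkV, if_pos h]
      by_cases hv : v ≤ c
      · rw [if_pos hv, if_pos hv]; exact ih (c + 2)
      · rw [if_neg hv, if_neg hv]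
    · rw [if_neg (by simpa using h)]
      simp only [pvWalkB, if_neg h]
      exact ih c

theorem pvWalkB_eq_walkV (nums : List Int) (l r c : Int) :
    pvWalkB l r (PySem.List.enumerate nums) c
      = pvWalkV (((pvArr nums).filter (fun j => decide (l ≤ j ∧ j ≤ r))).map
          (fun j => PySem.List.pyGetD nums j 0)) c := by
  rw [pvWalkB_filter, PySem.List.enumerate_eq_map_pyRange nums 0]
  rw [List.filter_map, List.map_map]
  unfold pvArr
  rw [List.filter_filter]
  have hpred : ∀ j : Int,
      ((fun p : Int × Int => decide (l ≤ p.1 ∧ p.1 ≤ r ∧ PySem.Int.mod p.2 2 = 0)) ∘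
        (fun j => (j, PySem.List.pyGetD nums j 0))) j
      = ((fun j : Int => decide (l ≤ j ∧ j ≤ r)) j
          && (fun i : Int => PySem.Int.mod (PySem.List.pyGetD nums i 0) 2 == 0) j) := by
    intro j
    simp only [Function.comp_def]
    generalize PySem.Int.mod (PySem.List.pyGetD nums j 0) 2 = x
    by_cases h1 : l ≤ j ∧ j ≤ r <;> by_cases h2 : x = 0 <;> simp [h1, h2]
  rw [List.filter_congr (fun a _ => hpred a)]
  rfl

theorem pvWalkJ (E : List Int) (k : Int) (j : Nat) (hj : j ≤ E.length)
    (hin : ∀ (t : Nat) (ht : t < E.length), t < j → E[t] ≤ 2 * (k + t))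
    (hout : ∀ (h : j < E.length), 2 * (k + (j : Int)) < E[j]) :
    pvWalkV E (2 * k) = 2 * (k + (j : Int)) := by
  induction E generalizing k j with
  | nil =>
    have : j = 0 := Nat.le_zero.mp hj
    subst this
    simp [pvWalkV]
  | cons v t ih =>
    cases j with
    | zero =>
      have hv := hout (by simp)
      simp only [List.getElem_cons_zero] at hv
      simp only [pvWalkV]
      rw [if_neg (by omega)]
      simp
    | succ j' =>
      have hv0 : v ≤ 2 * k := by
        have := hin 0 (by simp) (Nat.succ_pos j')
        simpa using this
      simp only [pvWalkV, if_pos hv0]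
      have h2 : (2 : Int) * k + 2 = 2 * (k + 1) := by ring
      rw [h2, ih (k + 1) j' (by simpa using hj) ?_ ?_]
      · push_cast; ring
      · intro s hs hlt
        have := hin (s + 1) (by simpa using hs) (by omega)
        simp only [List.getElem_cons_succ] at this
        push_cast at this ⊢
        omega
      · intro h
        have := hout (by simpa using h)
        simp only [List.getElem_cons_succ] at this
        push_cast at this ⊢
        omega

theorem pvCumsum_length (a : Int) (L : List Int) : (pvCumsum a L).length = L.length := by
  induction L generalizing a with
  | nil => rfl
  | cons x t ih => simp [pvCumsum, ih]

theorem pvCumsum_getElem (a : Int) (L : List Int) (i : Nat) (h : i < (pvCumsum a L).length) :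
    (pvCumsum a L)[i] = a + (L.take (i + 1)).sum := by
  induction L generalizing a i with
  | nil => simp [pvCumsum] at h
  | cons x t ih =>
    cases i with
    | zero => simp [pvCumsum]
    | succ i' =>
      have h' : i' < (pvCumsum (a + x) t).length := by
        simpa [pvCumsum] using h
      simp only [pvCumsum, List.getElem_cons_succ]
      rw [ih (a + x) i' h', List.take_succ_cons, List.sum_cons]
      ring

theorem pvPrefixDiffs_spec (nums : List Int) (hne : pvArr nums ≠ []) :
    pvPrefixDiffs nums (pvArr nums)
      = (pvH nums 0 - 1) :: (List.range ((pvArr nums).length - 1)).map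
          (fun j => pvH nums (j + 1) - pvH nums j - 1) := by
  have hm : 0 < (pvArr nums).length := List.length_pos_iff.mpr hne
  have hbase : pvPrefixBase nums (pvArr nums) = [pvH nums 0 - 1] := by
    unfold pvPrefixBase
    rw [if_pos hne, PySem.List.pyGetD_zero, List.getD_eq_getElem _ _ hm]
    have h0 : PySem.List.pyGetD nums ((pvArr nums)[0]) 0 = (pvE nums)[0]'(by rw [pvE_length]; exact hm) := by
      unfold pvE; rw [List.getElem_map]
    rw [h0, pvE_even nums 0 (by rw [pvE_length]; exact hm)]
    have : 2 * pvH nums 0 - 2 = 2 * (pvH nums 0 - 1) := by ring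
    rw [this, PySem.Int.floordiv_eq_ediv_of_pos (by norm_num),
      Int.mul_ediv_cancel_left _ (by norm_num)]
  unfold pvPrefixDiffs
  rw [PySem.List.foldl_append_singleton_eq_map, hbase]
  have hlen : PySem.List.len (pvArr nums) - 1 = (((pvArr nums).length - 1 : Nat) : Int) := by
    rw [PySem.List.len_eq]; omega
  rw [hlen, PySem.List.pyRange_zero_natCast, List.map_map, List.singleton_append]
  congr 1
  apply List.map_congr_left
  intro j hj
  have hjlt : j < (pvArr nums).length - 1 := List.mem_range.mp hj
  simp only [Function.comp_def]
  have hcast : ((j : Nat) : Int) + 1 = (((j + 1 : Nat)) : Int) := by push_cast; ring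
  rw [hcast, pvLookup nums (j + 1) (by omega), pvLookup nums j (by omega)]
  rw [pvE_even nums (j + 1) (by rw [pvE_length]; omega), pvE_even nums j (by rw [pvE_length]; omega)]
  have : 2 * pvH nums (j + 1) - 2 * pvH nums j - 2 = 2 * (pvH nums (j + 1) - pvH nums j - 1) := by ring
  rw [this, PySem.Int.floordiv_eq_ediv_of_pos (by norm_num),
    Int.mul_ediv_cancel_left _ (by norm_num)]

theorem pvPrefix_length (nums : List Int) : (pvPrefix nums).length = (pvArr nums).length := by
  unfold pvPrefix
  rw [pvCumsum_length]
  by_cases h : pvArr nums = []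
  · have hpr : PySem.List.pyRange 0 (PySem.List.len (pvArr nums) - 1) 1 = [] := by
      rw [h]; rfl
    unfold pvPrefixDiffs pvPrefixBase
    rw [hpr]
    simp [h]
  · rw [pvPrefixDiffs_spec nums h]
    have hm : 0 < (pvArr nums).length := List.length_pos_iff.mpr h
    simp
    omega

set_option maxHeartbeats 1000000 in
theorem pvPrefix_getElem (nums : List Int) (i : Nat) (h : i < (pvPrefix nums).length) :
    (pvPrefix nums)[i] = pvH nums i - 1 - (i : Int) := by
  have hlen := pvPrefix_length nums
  have hne : pvArr nums ≠ [] := by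
    intro h0
    rw [hlen, h0] at h
    simp at h
  have hD := pvPrefixDiffs_spec nums hne
  have hm : 0 < (pvArr nums).length := List.length_pos_iff.mpr hne
  have hDlen : (pvPrefixDiffs nums (pvArr nums)).length = (pvArr nums).length := by
    rw [hD]
    simp
    omega
  induction i with
  | zero =>
    have e0 : (pvPrefix nums)[0]'h = 0 + ((pvPrefixDiffs nums (pvArr nums)).take (0 + 1)).sum :=
      pvCumsum_getElem 0 (pvPrefixDiffs nums (pvArr nums)) 0 (by rw [pvCumsum_length, hDlen]; exact hm)
    rw [e0, List.sum_take_succ _ 0 (by rw [hDlen]; exact hm), List.getElem_of_eq hD]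
    simp
  | succ i' ih =>
    have hi' : i' < (pvPrefix nums).length := by omega
    have hi1 : i' + 1 < (pvPrefixDiffs nums (pvArr nums)).length := by
      rw [hDlen]
      omega
    have hval : (pvPrefixDiffs nums (pvArr nums))[i' + 1]'hi1 = pvH nums (i' + 1) - pvH nums i' - 1 := by
      rw [List.getElem_of_eq hD]
      simp only [List.getElem_cons_succ, List.getElem_map, List.getElem_range]
    have hcl' : i' < (pvCumsum 0 (pvPrefixDiffs nums (pvArr nums))).length := by
      rw [pvCumsum_length, hDlen]
      omega
    have e1 := pvCumsum_getElem 0 (pvPrefixDiffs nums (pvArr nums)) i' hcl'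
    have ihv : (0 : Int) + ((pvPrefixDiffs nums (pvArr nums)).take (i' + 1)).sum
        = pvH nums i' - 1 - (i' : Int) := by
      rw [← e1]
      exact ih hi'
    have e2 : (pvPrefix nums)[i' + 1]'h = 0 + ((pvPrefixDiffs nums (pvArr nums)).take (i' + 1 + 1)).sum :=
      pvCumsum_getElem 0 (pvPrefixDiffs nums (pvArr nums)) (i' + 1) (by rw [pvCumsum_length, hDlen]; omega)
    rw [e2, List.sum_take_succ _ (i' + 1) hi1, hval]
    push_cast at ihv ⊢
    omega

theorem pvPrefix_sorted (nums : List Int)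
    (hch : List.Pairwise (· < ·) (nums.filter (fun v => PySem.Int.mod v 2 == 0))) :
    (pvPrefix nums).Pairwise (· ≤ ·) := by
  rw [List.pairwise_iff_getElem]
  intro i j hi hj hij
  rw [pvPrefix_getElem nums i hi, pvPrefix_getElem nums j hj]
  have hj' : j < (pvE nums).length := by
    rw [pvE_length]; rw [pvPrefix_length] at hj; exact hj
  have hm := pvH_mono nums hch i (j - i) (by omega)
  have hidx : i + (j - i) = j := by omega
  rw [hidx] at hm
  omega

theorem pvSlice (xs : List Int) (l r : Int) (c1 c2 : Nat)
    (h1 : ∀ (j : Nat) (hj : j < xs.length), j < c1 → xs[j] < l)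
    (h2 : ∀ (j : Nat) (hj : j < xs.length), c1 ≤ j → l ≤ xs[j])
    (h3 : ∀ (j : Nat) (hj : j < xs.length), j < c2 → xs[j] ≤ r)
    (h4 : ∀ (j : Nat) (hj : j < xs.length), c2 ≤ j → r < xs[j])
    (hc1 : c1 ≤ xs.length) (hc2 : c2 ≤ xs.length) :
    xs.filter (fun v => decide (l ≤ v ∧ v ≤ r)) = (xs.take c2).drop c1 := by
  induction xs generalizing c1 c2 with
  | nil => simp
  | cons x t ih =>
    cases c1 with
    | zero =>
      cases c2 with
      | zero =>
        have hall : ∀ a ∈ x :: t, ¬((fun v => decide (l ≤ v ∧ v ≤ r)) a = true) := by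
          intro a ha
          obtain ⟨j, hj, rfl⟩ := List.mem_iff_getElem.mp ha
          have := h4 j hj (Nat.zero_le j)
          simp only [decide_eq_true_eq]
          omega
        rw [List.filter_eq_nil_iff.mpr hall]
        simp
      | succ c2' =>
        have hx1 : l ≤ x := by simpa using h2 0 (by simp) (Nat.zero_le 0)
        have hx2 : x ≤ r := by simpa using h3 0 (by simp) (Nat.succ_pos c2')
        rw [List.filter_cons, if_pos (by simp [hx1, hx2]), List.take_succ_cons]
        have := ih 0 c2'
          (fun j hj hlt => by omega)
          (fun j hj hge => by
            have := h2 (j + 1) (by simpa using hj) (Nat.zero_le _)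
            simpa using this)
          (fun j hj hlt => by
            have := h3 (j + 1) (by simpa using hj) (by omega)
            simpa using this)
          (fun j hj hge => by
            have := h4 (j + 1) (by simpa using hj) (by omega)
            simpa using this)
          (Nat.zero_le _) (by simpa using Nat.succ_le_succ_iff.mp hc2)
        simp only [List.drop_zero] at this ⊢
        rw [this]
    | succ c1' =>
      have hx : x < l := by simpa using h1 0 (by simp) (Nat.succ_pos c1')
      rw [List.filter_cons, if_neg (by simp; omega)]
      cases c2 with
      | zero =>
        have := ih c1' 0
          (fun j hj hlt => by
            have := h1 (j + 1) (by simpa using hj) (by omega)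
            simpa using this)
          (fun j hj hge => by
            have := h2 (j + 1) (by simpa using hj) (by omega)
            simpa using this)
          (fun j hj hlt => by omega)
          (fun j hj hge => by
            have := h4 (j + 1) (by simpa using hj) (by omega)
            simpa using this)
          (by simpa using Nat.succ_le_succ_iff.mp hc1) (Nat.zero_le _)
        simp only [List.take_zero, List.drop_nil] at this ⊢
        rw [this]
      | succ c2' =>
        rw [List.take_succ_cons, List.drop_succ_cons]
        exact ih c1' c2'
          (fun j hj hlt => by
            have := h1 (j + 1) (by simpa using hj) (by omega)
            simpa using this)
          (fun j hj hge => by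
            have := h2 (j + 1) (by simpa using hj) (by omega)
            simpa using this)
          (fun j hj hlt => by
            have := h3 (j + 1) (by simpa using hj) (by omega)
            simpa using this)
          (fun j hj hge => by
            have := h4 (j + 1) (by simpa using hj) (by omega)
            simpa using this)
          (by simpa using Nat.succ_le_succ_iff.mp hc1) (by simpa using Nat.succ_le_succ_iff.mp hc2)

-- the per-query equality
theorem pvArr_mem_bounds (nums : List Int) :
    ∀ x ∈ pvArr nums, 0 ≤ x ∧ x < (nums.length : Int) := by
  intro x hx
  unfold pvArr at hx
  rw [PySem.List.len_eq, PySem.List.pyRange_zero_natCast] at hx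
  obtain ⟨j, hj, rfl⟩ := List.mem_map.mp (List.mem_of_mem_filter hx)
  have := List.mem_range.mp hj
  omega

set_option maxHeartbeats 1000000 in
theorem pvPerQueryMain (nums : List Int) (l r k : Int)
    (hch : List.Pairwise (· < ·) (nums.filter (fun v => PySem.Int.mod v 2 == 0)))
    (hlr : l ≤ r) :
    pvAdelta nums (pvArr nums) (pvPrefix nums) [l, r, k] = pvBdelta nums [l, r, k] := by
  have hpair : (pvArr nums).Pairwise (· ≤ ·) := (pvArr_pairwise nums).imp (fun h => le_of_lt h)
  obtain ⟨hbl1, hbl2, hbl3⟩ := PySem.List.bisectLeft_spec (pvArr nums) l hpair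
  obtain ⟨hbr1, hbr2, hbr3⟩ := PySem.List.bisectRight_spec (pvArr nums) r hpair
  simp only [pvAdelta, pvBdelta]
  set c1 := PySem.List.bisectLeft (pvArr nums) l with hc1def
  set c2 := PySem.List.bisectRight (pvArr nums) r with hc2def
  have hc12 : c1 ≤ c2 := by
    by_contra hcon
    push_neg at hcon
    have hx1 := hbl2 c2 (lt_of_lt_of_le hcon hbl1) hcon
    have hx2 := hbr3 c2 (lt_of_lt_of_le hcon hbl1) (le_refl c2)
    omega
  have hEl0 : (pvE nums).length = (pvArr nums).length := pvE_length nums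
  have hslice := pvSlice (pvArr nums) l r c1 c2 hbl2 hbl3 hbr2 hbr3 hbl1 hbr1
  have hB : pvWalkB l r (PySem.List.enumerate nums) (2 * k)
      = pvWalkV (((pvE nums).take c2).drop c1) (2 * k) := by
    rw [pvWalkB_eq_walkV, hslice]
    unfold pvE
    rw [List.map_drop, List.map_take]
  rw [hB]
  set E := ((pvE nums).take c2).drop c1 with hEdef
  have hElen : E.length = c2 - c1 := by
    rw [hEdef, List.length_drop, List.length_take]
    omega
  have hEget : ∀ (t : Nat) (ht : t < E.length),
      E[t] = (pvE nums)[c1 + t]'(by rw [hElen] at ht; omega) := by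
    intro t ht
    rw [List.getElem_of_eq hEdef]
    simp only [List.getElem_drop, List.getElem_take]
  split_ifs with hg hb1 hb2
  · -- empty range: both 2*k
    have hE0 : E = [] := by
      rcases hg with hg | hg
      · rw [hEdef]
        apply List.drop_eq_nil_of_le
        rw [List.length_take]
        omega
      · have hz : c2 = 0 := by omega
        rw [hEdef, hz]
        simp
    rw [hE0]
    rfl
  · -- k < first: answer 2*k
    push_neg at hg
    obtain ⟨hc1m', hc2pos'⟩ := hg
    have hc1m : c1 < (pvArr nums).length := by omega
    have hfirstH : PySem.Int.floordiv
        (PySem.List.pyGetD nums (PySem.List.pyGetD (pvArr nums) ((c1 : Nat) : Int) 0) 0) 2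
        = pvH nums c1 := by
      rw [pvLookup nums c1 hc1m]
      unfold pvH
      rw [List.getD_eq_getElem _ _ (by omega)]
    rw [hfirstH] at hb1
    have hwalk := pvWalkJ E k 0 (Nat.zero_le _)
      (fun t ht h0 => absurd h0 (by omega))
      (fun h0 => by
        rw [hEget 0 h0, pvE_even nums (c1 + 0) (by omega)]
        have hz : c1 + 0 = c1 := by omega
        rw [hz]
        push_cast
        omega)
    rw [hwalk]
    norm_num
  · -- all of the range removed
    push_neg at hg
    obtain ⟨hc1m', hc2pos'⟩ := hg
    have hc1m : c1 < (pvArr nums).length := by omega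
    have hc2pos : 1 ≤ c2 := by omega
    have hcast2 : ((c2 : Int) - 1) = (((c2 - 1 : Nat)) : Int) := by omega
    have hlastH : PySem.Int.floordiv
        (PySem.List.pyGetD nums (PySem.List.pyGetD (pvArr nums) ((c2 : Int) - 1) 0) 0) 2
        = pvH nums (c2 - 1) := by
      rw [hcast2, pvLookup nums (c2 - 1) (by omega)]
      unfold pvH
      rw [List.getD_eq_getElem _ _ (by omega)]
    rw [hlastH] at hb2
    have hwalk := pvWalkJ E k (c2 - c1) (by omega)
      (fun t ht hlt => by
        rw [hEget t ht, pvE_even nums (c1 + t) (by rw [hElen] at ht; omega)]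
        have hmono := pvH_mono nums hch (c1 + t) ((c2 - 1) - (c1 + t))
          (by rw [hElen] at ht; omega)
        have hidx : c1 + t + ((c2 - 1) - (c1 + t)) = c2 - 1 := by
          rw [hElen] at ht
          omega
        rw [hidx] at hmono
        omega)
      (fun hcon => by
        rw [hElen] at hcon
        exact absurd hcon (lt_irrefl _))
    rw [hwalk]
    congr 1
    omega
  · -- the bisect-on-prefix branch
    push_neg at hg hb1 hb2
    obtain ⟨hc1m', hc2pos'⟩ := hg
    have hc1m : c1 < (pvArr nums).length := by omega
    have hc2pos : 1 ≤ c2 := by omega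
    have hcast2 : ((c2 : Int) - 1) = (((c2 - 1 : Nat)) : Int) := by omega
    have hfirstH : PySem.Int.floordiv
        (PySem.List.pyGetD nums (PySem.List.pyGetD (pvArr nums) ((c1 : Nat) : Int) 0) 0) 2
        = pvH nums c1 := by
      rw [pvLookup nums c1 hc1m]
      unfold pvH
      rw [List.getD_eq_getElem _ _ (by omega)]
    have hlastH : PySem.Int.floordiv
        (PySem.List.pyGetD nums (PySem.List.pyGetD (pvArr nums) ((c2 : Int) - 1) 0) 0) 2
        = pvH nums (c2 - 1) := by
      rw [hcast2, pvLookup nums (c2 - 1) (by omega)]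
      unfold pvH
      rw [List.getD_eq_getElem _ _ (by omega)]
    rw [hfirstH] at hb1
    rw [hlastH] at hb2
    have hplen : (pvPrefix nums).length = (pvArr nums).length := pvPrefix_length nums
    have hpsort := pvPrefix_sorted nums hch
    obtain ⟨hq1, hq2, hq3⟩ := PySem.List.bisectLeft_spec (pvPrefix nums) (k - (c1 : Int)) hpsort
    set bl := PySem.List.bisectLeft (pvPrefix nums) (k - (c1 : Int)) with hbldef
    have hblc1 : c1 < bl := by
      by_contra hcon
      push_neg at hcon
      have hc := hq3 c1 (by omega) hcon
      rw [pvPrefix_getElem nums c1 (by omega)] at hc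
      omega
    have hblc2 : bl ≤ c2 - 1 := by
      by_contra hcon
      push_neg at hcon
      have hc := hq2 (c2 - 1) (by omega) hcon
      rw [pvPrefix_getElem nums (c2 - 1) (by omega)] at hc
      omega
    have hcastb : ((bl : Int) - 1) = (((bl - 1 : Nat)) : Int) := by omega
    rw [hcastb, pvLookup nums (bl - 1) (by omega),
      pvE_even nums (bl - 1) (by omega)]
    have hpg : PySem.List.pyGetD (pvPrefix nums) (((bl - 1 : Nat)) : Int) 0
        = pvH nums (bl - 1) - 1 - ((bl - 1 : Nat) : Int) := by
      rw [PySem.List.pyGetD_natCast, List.getD_eq_getElem _ _ (by omega),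
        pvPrefix_getElem nums (bl - 1) (by omega)]
    rw [hpg]
    have hwalk := pvWalkJ E k (bl - c1) (by omega)
      (fun t ht hlt => by
        rw [hEget t ht, pvE_even nums (c1 + t) (by rw [hElen] at ht; omega)]
        have hc := hq2 (c1 + t) (by omega) (by omega)
        rw [pvPrefix_getElem nums (c1 + t) (by omega)] at hc
        omega)
      (fun hcon => by
        rw [hEget (bl - c1) hcon,
          pvE_even nums (c1 + (bl - c1)) (by rw [hElen] at hcon; omega)]
        have hbi : c1 + (bl - c1) = bl := by omega
        rw [hbi]
        have hc := hq3 bl (by omega) (le_refl bl)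
        rw [pvPrefix_getElem nums bl (by omega)] at hc
        omega)
    rw [hwalk]
    congr 1
    omega


theorem pvPerQuery (nums : List Int) (l r k : Int)
    (hch : List.Pairwise (· < ·) (nums.filter (fun v => PySem.Int.mod v 2 == 0)))
    (hlr : l ≤ r ∨ r < 0 ∨ (nums.length : Int) ≤ l) :
    pvAdelta nums (pvArr nums) (pvPrefix nums) [l, r, k] = pvBdelta nums [l, r, k] := by
  have hpair : (pvArr nums).Pairwise (· ≤ ·) := (pvArr_pairwise nums).imp (fun h => le_of_lt h)
  obtain ⟨hbl1, hbl2, hbl3⟩ := PySem.List.bisectLeft_spec (pvArr nums) l hpair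
  obtain ⟨hbr1, hbr2, hbr3⟩ := PySem.List.bisectRight_spec (pvArr nums) r hpair
  rcases hlr with hlr | hneg | hbig
  · exact pvPerQueryMain nums l r k hch hlr
  ·
    -- r < 0: the window is empty and A's guard fires (right = -1)
    simp only [pvAdelta, pvBdelta]
    have hc2 : PySem.List.bisectRight (pvArr nums) r = 0 := by
      by_contra hc
      have h0 : 0 < (pvArr nums).length := by omega
      have h1 := hbr2 0 h0 (by omega)
      have h2 := (pvArr_mem_bounds nums _ (List.getElem_mem h0)).1
      omega
    rw [if_pos (Or.inr (by rw [hc2]; norm_num))]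
    rw [pvWalkB_eq_walkV]
    have hnil : (pvArr nums).filter (fun j => decide (l ≤ j ∧ j ≤ r)) = [] := by
      apply List.filter_eq_nil_iff.mpr
      intro x hx
      have := (pvArr_mem_bounds nums x hx).1
      simp only [decide_eq_true_eq]
      omega
    rw [hnil]
    rfl
  ·
    -- len(nums) ≤ l: the window is empty and A's guard fires (left = len(arr))
    simp only [pvAdelta, pvBdelta]
    have hc1 : PySem.List.bisectLeft (pvArr nums) l = (pvArr nums).length := by
      by_contra hc
      have hlt : PySem.List.bisectLeft (pvArr nums) l < (pvArr nums).length := by omega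
      have h1 := hbl3 _ hlt (le_refl _)
      have h2 := (pvArr_mem_bounds nums _ (List.getElem_mem hlt)).2
      omega
    rw [if_pos (Or.inl (by rw [hc1]))]
    rw [pvWalkB_eq_walkV]
    have hnil : (pvArr nums).filter (fun j => decide (l ≤ j ∧ j ≤ r)) = [] := by
      apply List.filter_eq_nil_iff.mpr
      intro x hx
      have := (pvArr_mem_bounds nums x hx).2
      simp only [decide_eq_true_eq]
      omega
    rw [hnil]
    rfl

-- ===== VERDICT (by name: the statement is the Claim_ definition above) =====
theorem kthRemainingInteger_spec : Claim_equal_kthRemainingInteger := by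
  intro nums queries _ hpre
  unfold Spec_kthRemainingInteger kthRemainingInteger kthRemainingInteger_alt
  obtain ⟨hch, hq⟩ := hpre
  have key : ∀ (qs : List (List Int)) (acc : List Int),
      (∀ q ∈ qs, q.length = 3 ∧
        (q.getD 0 0 ≤ q.getD 1 0 ∨ q.getD 1 0 < 0 ∨ (nums.length : Int) ≤ q.getD 0 0)) →
      qs.foldl (fun result q => result ++ pvAdelta nums (pvArr nums) (pvPrefix nums) q) acc
        = qs.foldl (fun result q => result ++ pvBdelta nums q) acc := by
    intro qs
    induction qs with
    | nil => intro acc _; rfl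
    | cons q t ih =>
      intro acc hall
      obtain ⟨hlen, hle⟩ := hall q (by simp)
      have hstep : pvAdelta nums (pvArr nums) (pvPrefix nums) q = pvBdelta nums q := by
        match q, hlen with
        | [l, r, k], _ =>
          exact pvPerQuery nums l r k hch (by simpa using hle)
      simp only [List.foldl_cons, hstep]
      exact ih _ (fun q' hq' => hall q' (by simp [hq']))
  exact key queries [] hq
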